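-- pv_equiv track=rewrite | github.com/1813927768/virus-report | spider/plot.py | adjustXAxies
-- ===== SOURCE A (Python) =====
-- def adjustXAxies(xArray):
--     maxLabelNum = 6
--
--     def replaceInterval(xArray,interval):
--         # 防止plot函数自动合并相同的x值（""）
--         resArray = [" "*i for i in range(len(xArray))]
--         for i in range(maxLabelNum):
--             loc = i*(interval+1)
--             if loc < len(xArray):
--                 resArray[loc] = xArray[loc]
--         return resArray
--
--     if len(xArray) <= maxLabelNum:
--         return xArray
--     else:
--         times = len(xArray)//maxLabelNum
--         return replaceInterval(xArray,times)
-- ===== SOURCE B (Python) =====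
-- def adjustXAxies(xArray):
--     maxLabelNum = 6
--     n = len(xArray)
--     if n <= maxLabelNum:
--         return xArray
--     step = n // maxLabelNum + 1
--     # Walk the indices in strides of `step`: each stride starts with a kept label
--     # followed by space-padded fillers. Since 6*step > n, at most 6 labels are kept,
--     # so no counter or membership test is needed.
--     out = []
--     pos = 0
--     while pos < n:
--         out.append(xArray[pos])
--         for j in range(pos + 1, min(pos + step, n)):
--             out.append(" " * j)
--         pos += step
--     return out
-- ===== Notes on version B (the rewrite author's own statement) =====
-- stated objective: alternative
-- what changed: A builds a full placeholder list of space-strings and then destructively overwrites up to six positions in a second loop with an explicit 'loc < len' guard; B never builds a placeholder and has no counter or membership test: it walks the indices once in strides of n//6+1, emitting the label at each stride start followed by the space fillers, correct because 6*(n//6+1) > n bounds the number of strides by 6.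
import Mathlib
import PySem

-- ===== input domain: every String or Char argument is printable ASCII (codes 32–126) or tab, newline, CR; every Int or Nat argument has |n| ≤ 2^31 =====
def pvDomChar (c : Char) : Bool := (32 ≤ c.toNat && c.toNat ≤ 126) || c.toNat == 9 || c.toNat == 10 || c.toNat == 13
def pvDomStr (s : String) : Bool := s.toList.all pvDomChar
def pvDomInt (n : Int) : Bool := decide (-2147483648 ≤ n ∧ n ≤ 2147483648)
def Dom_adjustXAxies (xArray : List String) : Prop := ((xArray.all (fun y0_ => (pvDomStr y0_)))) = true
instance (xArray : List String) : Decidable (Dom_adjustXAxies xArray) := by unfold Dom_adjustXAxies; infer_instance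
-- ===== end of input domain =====

-- B replaces A's placeholder-list-then-overwrite scheme by a single stride-walk over the
-- indices (label, then space fillers, per stride); objective: alternative decomposition, same cost.

-- ===== PORT A =====
-- inner helper 'replaceInterval' of A (closes over xArray and maxLabelNum = 6)
def pvReplaceInterval (xArray : List String) (interval : Nat) : List String :=
  let resArray := (List.range xArray.length).map (fun i => String.ofList (List.replicate i ' '))
  (List.range 6).foldl (fun res i =>
    if i * (interval + 1) < xArray.length then
      res.set (i * (interval + 1)) (xArray.getD (i * (interval + 1)) "") else res) resArray

def adjustXAxies (xArray : List String) : List String :=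
  if xArray.length ≤ 6 then xArray
  else
    let times := xArray.length / 6
    pvReplaceInterval xArray times

-- ===== PORT B =====
-- B's while loop: stride `s+1` (s = n//6), each pass appends the label at `pos`
-- and the space fillers for indices pos+1 … min(pos+s+1, n)-1, then advances pos.
def pvStrideWalk (xArray : List String) (s : Nat) (pos : Nat) : List String :=
  if pos < xArray.length then
    xArray.getD pos "" ::
      (((List.range' (pos + 1) (min (pos + (s + 1)) xArray.length - (pos + 1))).map
        (fun j => String.ofList (List.replicate j ' '))) ++ pvStrideWalk xArray s (pos + (s + 1)))
  else []
termination_by xArray.length - pos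
decreasing_by omega

def adjustXAxies_alt (xArray : List String) : List String :=
  if xArray.length ≤ 6 then xArray
  else pvStrideWalk xArray (xArray.length / 6) 0

-- ===== PRECONDITION & SPEC =====
def Spec_adjustXAxies (xArray : List String) (out : List String) : Prop := out = adjustXAxies_alt xArray
instance (xArray : List String) (out : List String) : Decidable (Spec_adjustXAxies xArray out) := by unfold Spec_adjustXAxies; infer_instance

-- ===== CLAIM (what is proved, stated in full; the proofs are below) =====
def Claim_equal_adjustXAxies : Prop := ∀ (xArray : List String), Dom_adjustXAxies xArray → Spec_adjustXAxies xArray (adjustXAxies xArray)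

-- ===== LEMMAS AND PROOFS =====

-- A's overwrite loop, characterized pointwise: index j holds xArray[j] iff some iteration hit j.
theorem pvFoldlSet_getElem? (xA : List String) (t : Nat) (l : List Nat) (res : List String)
    (hlen : res.length = xA.length) (j : Nat) :
    (l.foldl (fun res i =>
        if i * (t + 1) < xA.length then res.set (i * (t + 1)) (xA.getD (i * (t + 1)) "") else res) res)[j]? =
      if (∃ i ∈ l, i * (t + 1) = j) ∧ j < xA.length then some (xA.getD j "") else res[j]? := by
  induction l generalizing res with
  | nil => simp
  | cons i l ih =>
    simp only [List.foldl_cons]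
    have hlen' : (if i * (t + 1) < xA.length then
        res.set (i * (t + 1)) (xA.getD (i * (t + 1)) "") else res).length = xA.length := by
      split <;> simp [hlen]
    rw [ih _ hlen']
    have hstep : (if i * (t + 1) < xA.length then
        res.set (i * (t + 1)) (xA.getD (i * (t + 1)) "") else res)[j]? =
        if i * (t + 1) = j ∧ j < xA.length then some (xA.getD j "") else res[j]? := by
      by_cases hloc : i * (t + 1) < xA.length
      · rw [if_pos hloc, List.getElem?_set]
        by_cases he : i * (t + 1) = j
        · subst he; simp [hlen, hloc]
        · simp [he]
      · rw [if_neg hloc]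
        have : ¬(i * (t + 1) = j ∧ j < xA.length) := by rintro ⟨rfl, hc⟩; exact hloc hc
        rw [if_neg this]
    rw [hstep]
    by_cases hcons : (∃ i' ∈ i :: l, i' * (t + 1) = j) ∧ j < xA.length
    · rw [if_pos hcons]
      rcases hcons with ⟨⟨i', hi', he⟩, hjlen⟩
      rcases List.mem_cons.mp hi' with rfl | hmem'
      · by_cases hl : (∃ i'' ∈ l, i'' * (t + 1) = j) ∧ j < xA.length
        · rw [if_pos hl]
        · rw [if_neg hl, if_pos ⟨he, hjlen⟩]
      · rw [if_pos ⟨⟨i', hmem', he⟩, hjlen⟩]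
    · have h1 : ¬((∃ i' ∈ l, i' * (t + 1) = j) ∧ j < xA.length) := by
        rintro ⟨⟨i', hi', he⟩, hjlen⟩
        exact hcons ⟨⟨i', by simp [hi'], he⟩, hjlen⟩
      have h2 : ¬(i * (t + 1) = j ∧ j < xA.length) := by
        rintro ⟨he, hjlen⟩
        exact hcons ⟨⟨i, by simp, he⟩, hjlen⟩
      rw [if_neg hcons, if_neg h1, if_neg h2]

-- B's stride walk, characterized as a map over the remaining index range:
-- position j is kept iff its offset from the current stride origin is a multiple of s+1.
theorem pvStrideWalk_eq_map (xA : List String) (s : Nat) (pos : Nat) :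
    pvStrideWalk xA s pos =
      (List.range' pos (xA.length - pos)).map
        (fun j => if (j - pos) % (s + 1) = 0 then xA.getD j "" else String.ofList (List.replicate j ' ')) := by
  by_cases h : pos < xA.length
  · rw [pvStrideWalk, if_pos h]
    have hsplit : List.range' pos (xA.length - pos) =
        List.range' pos (min (pos + (s + 1)) xA.length - pos) ++
        List.range' (pos + (min (pos + (s + 1)) xA.length - pos))
          (xA.length - pos - (min (pos + (s + 1)) xA.length - pos)) := by
      rw [List.range'_append_1]
      congr 1
      omega
    rw [hsplit, List.map_append]
    have hfirst : List.range' pos (min (pos + (s + 1)) xA.length - pos) =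
        pos :: List.range' (pos + 1) (min (pos + (s + 1)) xA.length - (pos + 1)) := by
      have : min (pos + (s + 1)) xA.length - pos = (min (pos + (s + 1)) xA.length - (pos + 1)) + 1 := by omega
      rw [this, List.range'_succ]
    rw [hfirst]
    simp only [List.map_cons, Nat.sub_self, Nat.zero_mod]
    congr 1
    congr 1
    · -- fillers within the stride: offsets 1 … s, never multiples of s+1
      apply List.map_congr_left
      intro j hj
      rw [List.mem_range'] at hj
      have : (j - pos) % (s + 1) ≠ 0 := by
        have h1 : 1 ≤ j - pos := by omega
        have h2 : j - pos < s + 1 := by omega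
        rw [Nat.mod_eq_of_lt h2]; omega
      rw [if_neg this]
    · -- tail: either the next stride (residues agree) or both sides empty
      rw [pvStrideWalk_eq_map xA s (pos + (s + 1))]
      by_cases h2 : pos + (s + 1) ≤ xA.length
      · have he : pos + (min (pos + (s + 1)) xA.length - pos) = pos + (s + 1) := by omega
        have hn : xA.length - pos - (min (pos + (s + 1)) xA.length - pos) =
            xA.length - (pos + (s + 1)) := by omega
        rw [he, hn]
        apply List.map_congr_left
        intro j hj
        rw [List.mem_range'] at hj
        have : j - pos = (j - (pos + (s + 1))) + (s + 1) := by omega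
        rw [this, Nat.add_mod_right]
      · have hn : xA.length - pos - (min (pos + (s + 1)) xA.length - pos) = 0 := by omega
        have hn2 : xA.length - (pos + (s + 1)) = 0 := by omega
        rw [hn, hn2]
        simp
  · rw [pvStrideWalk, if_neg h]
    have : xA.length - pos = 0 := by omega
    rw [this]
    simp
termination_by xA.length - pos
decreasing_by omega

theorem adjustXAxies_eq (xArray : List String) :
    adjustXAxies xArray = adjustXAxies_alt xArray := by
  by_cases h : xArray.length ≤ 6
  · simp only [adjustXAxies, adjustXAxies_alt, if_pos h]
  · simp only [adjustXAxies, adjustXAxies_alt, pvReplaceInterval, if_neg h]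
    set n := xArray.length with hn
    set s := n / 6 with hs
    have hlt : n < 6 * (s + 1) := by
      have := Nat.div_add_mod n 6
      have := Nat.mod_lt n (by norm_num : 0 < 6)
      omega
    rw [pvStrideWalk_eq_map]
    apply List.ext_getElem?
    intro j
    rw [pvFoldlSet_getElem? xArray s _ _ (by simp; exact hn)]
    by_cases hj : j < n
    · have hmapA : ((List.range n).map (fun i => String.ofList (List.replicate i ' ')))[j]? =
          some (String.ofList (List.replicate j ' ')) := by
        simp [hj]
      have hmapB : ((List.range' 0 (n - 0)).map
          (fun j => if (j - 0) % (s + 1) = 0 then xArray.getD j ""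
            else String.ofList (List.replicate j ' ')))[j]? =
          some (if j % (s + 1) = 0 then xArray.getD j ""
            else String.ofList (List.replicate j ' ')) := by
        have hjr : (List.range' 0 (n - 0))[j]? = some j := by
          rw [List.getElem?_range' (show j < n - 0 by omega)]; simp
        rw [List.getElem?_map, hjr]
        simp
      rw [hmapA] at *
      rw [hmapB]
      have hiff : ((∃ i ∈ List.range 6, i * (s + 1) = j) ∧ j < n) ↔ j % (s + 1) = 0 := by
        constructor
        · rintro ⟨⟨i, _, rfl⟩, _⟩
          simp [Nat.mul_mod_left]
        · intro hmod
          obtain ⟨i, rfl⟩ := (Nat.dvd_of_mod_eq_zero hmod)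
          refine ⟨⟨i, ?_, by ring⟩, hj⟩
          rw [List.mem_range]
          by_contra hge
          push Not at hge
          have : 6 * (s + 1) ≤ (s + 1) * i := Nat.mul_le_mul_right _ hge |>.trans_eq (Nat.mul_comm _ _)
          omega
      by_cases hk : j % (s + 1) = 0
      · rw [if_pos (hiff.mpr hk), if_pos hk]
      · rw [if_neg (fun hc => hk (hiff.mp hc)), if_neg hk]
    · have hno : ¬ ((∃ i ∈ List.range 6, i * (s + 1) = j) ∧ j < n) := fun hh => hj hh.2
      rw [if_neg hno]
      rw [List.getElem?_eq_none (by simp; omega),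
          List.getElem?_eq_none (by simp; omega)]

-- ===== VERDICT (by name: the statement is the Claim_ definition above) =====
theorem adjustXAxies_spec : Claim_equal_adjustXAxies := by
  intro xArray _
  exact adjustXAxies_eq xArray
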